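-- pv_equiv track=rewrite | github.com/morningsun77/ltr_checker | modules/module6.py | extract_sequences_by_ids
-- ===== SOURCE A (Python) =====
-- def extract_sequences_by_ids(file_content, id_list):
--     """
--     Extract sequences and their associated information for specified LTR IDs
--
--     Parameters:
--         file_content: Content containing LTR sequences
--         id_list: List of LTR IDs to extract
--
--     Returns:
--         dict: A dictionary with complete LTR headers as keys and sequences as values
--     """
--     result_dict = {}
--     current_header = None
--     sequence = []
--
--     for line in file_content.split('\n'):
--         if line.startswith('>'):
--             # Save previous sequence if its ID is in the target list
--             if current_header and current_header.split()[0][1:] in id_list: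
--                 result_dict[current_header] = ''.join(sequence)
--
--             # Get new header
--             current_header = line
--             sequence = []
--
--         elif line.strip() and current_header:
--             sequence.append(line.strip())
--
--     # Process the last sequence
--     if current_header and current_header.split()[0][1:] in id_list:
--         result_dict[current_header] = ''.join(sequence)
--
--     return result_dict
-- ===== SOURCE B (Python) =====
-- def extract_sequences_by_ids(file_content, id_list):
--     """Block decomposition: split the whole text on '\n>' into record blocks
--     (a '>' at line start is exactly a '\n>' in '\n'+content), drop the leading
--     junk block, and parse each block independently."""
--     ids = set(id_list)
--     result = {}
--     for block in ('\n' + file_content).split('\n>')[1:]: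
--         lines = block.split('\n')
--         header = '>' + lines[0]
--         if header.split()[0][1:] in ids:
--             result[header] = ''.join(s for s in (l.strip() for l in lines[1:]) if s)
--     return result
-- ===== Notes on version B (the rewrite author's own statement) =====
-- stated objective: alternative
-- what changed: Replaces A's stateful line-by-line scan (current_header/sequence carried across lines, previous record saved when the next header appears) with a whole-string block decomposition: '\n'+content is split once on '\n>' into independent record blocks, the leading junk block is dropped, and each block is parsed on its own (first line + stripped joined rest), with id membership tested against a set.
import Mathlib
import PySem

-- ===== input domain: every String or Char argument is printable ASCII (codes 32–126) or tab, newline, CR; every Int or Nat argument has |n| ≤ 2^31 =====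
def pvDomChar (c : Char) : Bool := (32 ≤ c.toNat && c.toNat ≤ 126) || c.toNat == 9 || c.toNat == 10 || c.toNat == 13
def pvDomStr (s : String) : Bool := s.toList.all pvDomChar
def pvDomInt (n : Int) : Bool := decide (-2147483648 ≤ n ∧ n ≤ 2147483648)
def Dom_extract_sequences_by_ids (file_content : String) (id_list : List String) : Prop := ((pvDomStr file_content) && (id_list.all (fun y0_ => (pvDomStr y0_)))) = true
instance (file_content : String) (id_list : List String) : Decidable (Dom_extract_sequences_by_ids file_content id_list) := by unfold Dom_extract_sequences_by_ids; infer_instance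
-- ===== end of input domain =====

-- B replaces A's stateful line-by-line scan (current_header/sequence carried across lines)
-- with a whole-string block decomposition: split '\n'+content on '\n>' into record blocks,
-- drop the leading junk block, parse each block independently; objective: alternative.

-- shared helper: header.split()[0][1:]
def pvKey (h : String) : String :=
  PySem.Str.slice (PySem.List.pyGetD (PySem.Str.split₀ h) 0 "") (some 1) none

-- ===== PORT A =====
-- Python truthiness of 'current_header' (None or a string)
def pvTruthy : Option String → Bool
  | none => false
  | some h => h ≠ ""

-- one iteration of A's for-loop; state = (result_dict, current_header, sequence)
def pvStepA (id_list : List String)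
    (st : PySem.Dict String String × Option String × List String) (line : String) :
    PySem.Dict String String × Option String × List String :=
  let (result, cur, seq) := st
  if PySem.Str.startswith line ">" then
    let result :=
      if pvTruthy cur && id_list.contains (pvKey (cur.getD "")) then
        result.insert (cur.getD "") (PySem.Str.join "" seq)
      else result
    (result, some line, [])
  else if PySem.Str.strip line ≠ "" && pvTruthy cur then
    (result, cur, seq ++ [PySem.Str.strip line])
  else
    (result, cur, seq)

def extract_sequences_by_ids (file_content : String) (id_list : List String) : List (String × String) :=
  let st := ((PySem.Str.split? file_content "\n").getD []).foldl (pvStepA id_list)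
      (PySem.Dict.empty, none, [])
  let (result, cur, seq) := st
  let result :=
    if pvTruthy cur && id_list.contains (pvKey (cur.getD "")) then
      result.insert (cur.getD "") (PySem.Str.join "" seq)
    else result
  result.items

-- ===== PORT B =====
-- loop body of B: parse one record block independently
def pvAltStep (ids : PySem.Set String) (result : PySem.Dict String String) (block : String) :
    PySem.Dict String String :=
  let lines := (PySem.Str.split? block "\n").getD []
  -- header = '>' + lines[0]  (string concatenation done on the character lists, exact)
  let header := String.ofList ('>' :: (PySem.List.pyGetD lines 0 "").toList)
  if PySem.Set.contains ids (pvKey header) then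
    result.insert header
      (PySem.Str.join "" (((PySem.List.slice lines (some 1) none).map PySem.Str.strip).filter
        (fun s => s ≠ "")))
  else result

def extract_sequences_by_ids_alt (file_content : String) (id_list : List String) : List (String × String) :=
  let ids := PySem.Set.ofList id_list
  -- ('\n' + file_content).split('\n>')  (the '+' done on the character lists, exact)
  let blocks := (PySem.Str.split? (String.ofList ('\n' :: file_content.toList)) "\n>").getD []
  ((PySem.List.slice blocks (some 1) none).foldl (pvAltStep ids) PySem.Dict.empty).items

-- ===== PRECONDITION & SPEC =====
def Spec_extract_sequences_by_ids (file_content : String) (id_list : List String) (out : List (String × String)) : Prop := out = extract_sequences_by_ids_alt file_content id_list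
instance (file_content : String) (id_list : List String) (out : List (String × String)) : Decidable (Spec_extract_sequences_by_ids file_content id_list out) := by unfold Spec_extract_sequences_by_ids; infer_instance

-- ===== CLAIM (what is proved, stated in full; the proofs are below) =====
def Claim_equal_extract_sequences_by_ids : Prop := ∀ (file_content : String) (id_list : List String), Dom_extract_sequences_by_ids file_content id_list → Spec_extract_sequences_by_ids file_content id_list (extract_sequences_by_ids file_content id_list)

-- ===== LEMMAS AND PROOFS =====

-- ---- a recursion-friendly characterisation of PySem.Chars.splitOn (nonempty separator) ----
def pvSplit (s0 : Char) (st : List Char) : List Char → List (List Char)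
  | [] => [[]]
  | c :: rest =>
    if (s0 :: st).isPrefixOf (c :: rest) then [] :: pvSplit s0 st (rest.drop st.length)
    else (pvSplit s0 st rest).modifyHead (c :: ·)
  termination_by l => l.length
  decreasing_by all_goals (simp; try omega)

theorem pvSplit_ne_nil (s0 : Char) (st : List Char) (cs : List Char) : pvSplit s0 st cs ≠ [] := by
  cases cs with
  | nil => simp [pvSplit]
  | cons c rest =>
    rw [pvSplit]
    split
    · simp
    · intro h
      have h2 : pvSplit s0 st rest = [] := by
        cases he : pvSplit s0 st rest with
        | nil => rfl
        | cons a t => rw [he] at h; simp [List.modifyHead] at h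
      exact pvSplit_ne_nil s0 st rest h2
  termination_by cs.length
  decreasing_by simp

theorem splitOn_go_eq (s0 : Char) (st : List Char) (fuel : Nat) :
    ∀ (l cur : List Char) (acc : List (List Char)), l.length ≤ fuel →
    PySem.Chars.splitOn.go (s0 :: st) fuel l cur acc
      = acc.reverse ++ (pvSplit s0 st l).modifyHead (fun x => cur.reverse ++ x) := by
  induction fuel with
  | zero =>
    intro l cur acc hl
    have : l = [] := List.eq_nil_of_length_eq_zero (Nat.le_zero.mp hl)
    subst this
    rw [PySem.Chars.splitOn.go]
    simp [pvSplit, List.modifyHead]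
  | succ fuel ih =>
    intro l cur acc hl
    cases l with
    | nil =>
      rw [PySem.Chars.splitOn.go]
      · simp [pvSplit, List.modifyHead]
      · omega
    | cons c rest =>
      rw [PySem.Chars.splitOn.go]
      by_cases hp : (s0 :: st).isPrefixOf (c :: rest) = true
      · rw [if_pos hp]
        rw [ih _ _ _ (by simp at hl ⊢; omega)]
        rw [pvSplit, if_pos hp]
        obtain ⟨h, t, he⟩ := List.exists_cons_of_ne_nil (pvSplit_ne_nil s0 st (rest.drop st.length))
        simp [he, List.modifyHead]
      · rw [if_neg hp]
        rw [ih _ _ _ (by simp at hl ⊢; omega)]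
        rw [pvSplit, if_neg hp]
        obtain ⟨h, t, he⟩ := List.exists_cons_of_ne_nil (pvSplit_ne_nil s0 st rest)
        simp [he, List.modifyHead]

theorem splitOn_eq_pvSplit (s0 : Char) (st : List Char) (cs : List Char) :
    PySem.Chars.splitOn cs (s0 :: st) = pvSplit s0 st cs := by
  rw [PySem.Chars.splitOn, splitOn_go_eq s0 st (cs.length + 1) cs [] [] (by omega)]
  obtain ⟨h, t, he⟩ := List.exists_cons_of_ne_nil (pvSplit_ne_nil s0 st cs)
  simp [he, List.modifyHead]

theorem pvSplit1_cons (c : Char) (rest : List Char) :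
    pvSplit '\n' [] (c :: rest)
      = if c = '\n' then [] :: pvSplit '\n' [] rest
        else (pvSplit '\n' [] rest).modifyHead (c :: ·) := by
  rw [pvSplit]
  simp only [List.isPrefixOf, Bool.and_true]
  by_cases hc : c = '\n'
  · subst hc; simp
  · rw [if_neg (by simpa using (Ne.symm hc)), if_neg hc]

theorem pvSplit1_no_newline (cs : List Char) :
    ∀ l ∈ pvSplit '\n' [] cs, '\n' ∉ l := by
  induction cs with
  | nil => simp [pvSplit]
  | cons c rest ih =>
    rw [pvSplit1_cons]
    by_cases hc : c = '\n'
    · rw [if_pos hc]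
      intro l hl
      rcases List.mem_cons.mp hl with h1 | h1
      · simp [h1]
      · exact ih l h1
    · rw [if_neg hc]
      obtain ⟨h, t, he⟩ := List.exists_cons_of_ne_nil (pvSplit_ne_nil '\n' [] rest)
      rw [he, List.modifyHead_cons]
      intro l hl
      rcases List.mem_cons.mp hl with h1 | h1
      · subst h1
        intro hmem
        rcases List.mem_cons.mp hmem with h2 | h2
        · exact hc h2.symm
        · exact ih h (by rw [he]; simp) h2
      · exact ih l (by rw [he]; simp [h1]) 

theorem pvSplit1_head_not_gt (cs : List Char) (h : cs.head? ≠ some '>') :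
    ∀ hd t, pvSplit '\n' [] cs = hd :: t → ¬ ['>'].isPrefixOf hd := by
  cases cs with
  | nil =>
    intro hd t he
    simp [pvSplit] at he
    simp [he.1]
  | cons c rest =>
    intro hd t he
    rw [pvSplit1_cons] at he
    by_cases hc : c = '\n'
    · rw [if_pos hc] at he
      injection he with h1 _
      simp [← h1]
    · rw [if_neg hc] at he
      obtain ⟨h2, t2, he2⟩ := List.exists_cons_of_ne_nil (pvSplit_ne_nil '\n' [] rest)
      rw [he2] at he
      simp [List.modifyHead] at he
      rw [← he.1]
      have : c ≠ '>' := by simpa using h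
      simp [List.isPrefixOf]
      intro hcontra
      exact absurd hcontra.symm this

theorem pvSplit1_append (l : List Char) : ∀ t, '\n' ∉ l →
    pvSplit '\n' [] (l ++ t) = (pvSplit '\n' [] t).modifyHead (l ++ ·) := by
  induction l with
  | nil =>
    intro t _
    obtain ⟨h, t2, he⟩ := List.exists_cons_of_ne_nil (pvSplit_ne_nil '\n' [] t)
    simp [he]
  | cons c rest ih =>
    intro t hl
    have h1 : ¬'\n' = c ∧ '\n' ∉ rest := by simpa using hl
    rw [List.cons_append, pvSplit1_cons, if_neg (fun hx => h1.1 hx.symm), ih t h1.2]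
    obtain ⟨h, t2, he⟩ := List.exists_cons_of_ne_nil (pvSplit_ne_nil '\n' [] t)
    simp [he]

def pvPrefJoin (ls : List (List Char)) : List Char := ls.flatMap (fun l => '\n' :: l)

theorem pvSplit1_prefJoin (ls : List (List Char)) : ∀ l0, '\n' ∉ l0 →
    (∀ l ∈ ls, '\n' ∉ l) →
    pvSplit '\n' [] (l0 ++ pvPrefJoin ls) = l0 :: ls := by
  induction ls with
  | nil =>
    intro l0 h0 _
    have h := pvSplit1_append l0 [] h0
    rw [List.append_nil] at h
    rw [show pvPrefJoin [] = [] from rfl, List.append_nil, h]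
    simp [pvSplit]
  | cons l rest ih =>
    intro l0 h0 hls
    rw [show pvPrefJoin (l :: rest) = '\n' :: (l ++ pvPrefJoin rest) from by
      simp [pvPrefJoin]]
    rw [pvSplit1_append l0 _ h0, pvSplit1_cons, if_pos rfl,
      ih l (hls l (by simp)) (fun x hx => hls x (by simp [hx]))]
    simp

def pvGlue : List (List Char) → List (List Char)
  | [] => []
  | [l] => [l]
  | l1 :: l2 :: rest =>
    if ['>'].isPrefixOf l2 then l1 :: pvGlue (l2.tail :: rest)
    else pvGlue ((l1 ++ '\n' :: l2) :: rest)
  termination_by ls => ls.length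
  decreasing_by all_goals simp

theorem pvGlue_append_head (t : List (List Char)) :
    ∀ x l, pvGlue ((x ++ l) :: t) = (pvGlue (l :: t)).modifyHead (x ++ ·) := by
  induction t with
  | nil => intro x l; simp [pvGlue]
  | cons l2 rest ih =>
    intro x l
    by_cases hp : ['>'].isPrefixOf l2 = true
    · rw [pvGlue, if_pos hp, pvGlue, if_pos hp]
      simp
    · rw [pvGlue, if_neg hp, pvGlue, if_neg hp]
      rw [show (x ++ l) ++ '\n' :: l2 = x ++ (l ++ '\n' :: l2) from by simp]
      exact ih x (l ++ '\n' :: l2)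

theorem pvSplit2_cons (c : Char) (rest : List Char) :
    pvSplit '\n' ['>'] (c :: rest)
      = if _hp : c = '\n' ∧ rest.head? = some '>'
        then [] :: pvSplit '\n' ['>'] rest.tail
        else (pvSplit '\n' ['>'] rest).modifyHead (c :: ·) := by
  rw [pvSplit]
  by_cases hc : c = '\n'
  · subst hc
    cases rest with
    | nil => simp [List.isPrefixOf]
    | cons r rs =>
      by_cases hr : r = '>'
      · subst hr; simp [List.isPrefixOf]
      · rw [if_neg (by simp [List.isPrefixOf]; intro h; exact absurd h.symm hr),
          dif_neg (by simp [hr])]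
  · rw [if_neg (by simp [List.isPrefixOf]; intro h; exact absurd h.symm hc),
      dif_neg (by simp [hc])]

theorem pvSplit2_eq_glue (n : Nat) : ∀ cs : List Char, cs.length ≤ n →
    pvSplit '\n' ['>'] cs = pvGlue (pvSplit '\n' [] cs) := by
  induction n with
  | zero =>
    intro cs hl
    have : cs = [] := List.eq_nil_of_length_eq_zero (Nat.le_zero.mp hl)
    subst this
    simp [pvSplit, pvGlue]
  | succ n ih =>
    intro cs hl
    cases cs with
    | nil => simp [pvSplit, pvGlue]
    | cons c rest =>
      rw [pvSplit2_cons, pvSplit1_cons]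
      by_cases hc : c = '\n'
      · subst hc
        rw [if_pos rfl]
        cases rest with
        | nil =>
          rw [dif_neg (by simp)]
          simp [pvSplit, pvGlue, List.modifyHead]
        | cons r rs =>
          by_cases hr : r = '>'
          · subst hr
            rw [dif_pos ⟨rfl, rfl⟩]
            rw [show ('>' :: rs).tail = rs from rfl]
            rw [pvSplit1_cons, if_neg (by decide)]
            obtain ⟨h, t, he⟩ := List.exists_cons_of_ne_nil (pvSplit_ne_nil '\n' [] rs)
            rw [he, List.modifyHead_cons]
            rw [pvGlue, if_pos (by simp [List.isPrefixOf])]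
            rw [show ('>' :: h).tail = h from rfl, ← he]
            rw [ih rs (by simp at hl; omega)]
          · rw [dif_neg (by simp [hr])]
            rw [ih (r :: rs) (by simp at hl ⊢; omega)]
            obtain ⟨h, t, he⟩ := List.exists_cons_of_ne_nil (pvSplit_ne_nil '\n' [] (r :: rs))
            have hnh : ¬ ['>'].isPrefixOf h :=
              pvSplit1_head_not_gt (r :: rs) (by simp; exact fun hx => absurd hx hr) h t he
            rw [he, pvGlue, if_neg (by simpa using hnh)]
            have := pvGlue_append_head t ['\n'] h
            simp only [List.cons_append, List.nil_append] at this
            rw [← this]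
            rfl
      · rw [dif_neg (by simp [hc]), if_neg hc]
        rw [ih rest (by simp at hl; omega)]
        obtain ⟨h, t, he⟩ := List.exists_cons_of_ne_nil (pvSplit_ne_nil '\n' [] rest)
        rw [he, List.modifyHead_cons]
        have := pvGlue_append_head t [c] h
        simp only [List.cons_append, List.nil_append] at this
        rw [← this]

def pvNotHdr (l : List Char) : Bool := !(['>'].isPrefixOf l)

def pvBlocksAfter : List (List Char) → List (List Char)
  | [] => []
  | h :: ls =>
    (h.tail ++ pvPrefJoin (ls.takeWhile pvNotHdr)) :: pvBlocksAfter (ls.dropWhile pvNotHdr)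
  termination_by ls => ls.length
  decreasing_by
    exact Nat.lt_succ_of_le (List.length_dropWhile_le _ _)

theorem pvGlue_records (ls : List (List Char)) : ∀ l0,
    pvGlue (l0 :: ls)
      = (l0 ++ pvPrefJoin (ls.takeWhile pvNotHdr)) :: pvBlocksAfter (ls.dropWhile pvNotHdr) := by
  induction ls with
  | nil => intro l0; simp [pvGlue, pvPrefJoin, pvBlocksAfter]
  | cons l2 rest ih =>
    intro l0
    by_cases hp : ['>'].isPrefixOf l2 = true
    · have hn : pvNotHdr l2 = false := by simp [pvNotHdr, hp]
      rw [pvGlue, if_pos hp, List.takeWhile_cons, List.dropWhile_cons, hn]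
      simp only [Bool.false_eq_true, if_false]
      rw [pvBlocksAfter, ih l2.tail]
      simp [pvPrefJoin]
    · have hn : pvNotHdr l2 = true := by simp [pvNotHdr, hp]
      rw [pvGlue, if_neg hp, ih (l0 ++ '\n' :: l2), List.takeWhile_cons, List.dropWhile_cons, hn]
      simp [pvPrefJoin]

-- ---- A-side: the stateful loop equals a record recursion over the line list ----
-- proof-side abbreviation for A's final save step (the code after the loop)
def pvFlush (id_list : List String)
    (st : PySem.Dict String String × Option String × List String) : PySem.Dict String String :=
  let (result, cur, seq) := st
  if pvTruthy cur && id_list.contains (pvKey (cur.getD "")) then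
    result.insert (cur.getD "") (PySem.Str.join "" seq)
  else result

def pvCollectB : List String → List String → List String × List String
  | [], parts => (parts, [])
  | l :: rest, parts =>
    if PySem.Str.startswith l ">" then (parts, l :: rest)
    else
      let s := PySem.Str.strip l
      pvCollectB rest (if s ≠ "" then parts ++ [s] else parts)

theorem pvCollectB_rest_le (lines parts : List String) :
    (pvCollectB lines parts).2.length ≤ lines.length := by
  induction lines generalizing parts with
  | nil => simp [pvCollectB]
  | cons l rest ih =>
    simp only [pvCollectB]
    split
    · simp
    · exact le_trans (ih _) (Nat.le_succ _)

def pvParseB (ids : PySem.Set String) :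
    List String → PySem.Dict String String → PySem.Dict String String
  | [], result => result
  | header :: rest, result =>
    let pr := pvCollectB rest []
    let result :=
      if PySem.Set.contains ids (pvKey header) then
        result.insert header (PySem.Str.join "" pr.1)
      else result
    pvParseB ids pr.2 result
  termination_by lines => lines.length
  decreasing_by
    exact Nat.lt_succ_of_le (pvCollectB_rest_le rest [])

theorem ne_empty_of_startswith {l : String} (h : PySem.Str.startswith l ">" = true) : l ≠ "" := by
  intro hl; subst hl; exact absurd h (by decide)

-- folding A's step over body lines = collecting them with pvCollectB
theorem foldA_body (id_list : List String) (rest : List String) (d : PySem.Dict String String)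
    (h : String) (hh : h ≠ "") (parts : List String) :
    rest.foldl (pvStepA id_list) (d, some h, parts)
      = (pvCollectB rest parts).2.foldl (pvStepA id_list) (d, some h, (pvCollectB rest parts).1) := by
  induction rest generalizing parts with
  | nil => simp [pvCollectB]
  | cons l t ih =>
    by_cases hl : PySem.Str.startswith l ">" = true
    · have hl2 : PySem.Chars.startswith l.toList ['>'] = true := by simpa using hl
      simp [pvCollectB, hl2]
    · have hl' : PySem.Chars.startswith l.toList ['>'] = false := by simpa using hl
      rw [show pvCollectB (l :: t) parts
          = pvCollectB t (if PySem.Str.strip l ≠ "" then parts ++ [PySem.Str.strip l] else parts)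
          from by simp [pvCollectB, hl']]
      rw [List.foldl_cons,
        show pvStepA id_list (d, some h, parts) l
          = (d, some h, if PySem.Str.strip l ≠ "" then parts ++ [PySem.Str.strip l] else parts)
          from by
            rw [pvStepA]
            simp [hl', pvTruthy, hh]
            split <;> rfl]
      exact ih _

-- after pvCollectB, the remainder is empty or starts with '>'
theorem pvCollectB_rest_head (lines parts : List String) :
    (pvCollectB lines parts).2 = [] ∨
      ∃ l t, (pvCollectB lines parts).2 = l :: t ∧ PySem.Str.startswith l ">" = true := by
  induction lines generalizing parts with
  | nil => left; simp [pvCollectB]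
  | cons l t ih =>
    by_cases hl : PySem.Str.startswith l ">" = true
    · have hl2 : PySem.Chars.startswith l.toList ['>'] = true := by simpa using hl
      right; exact ⟨l, t, by simp [pvCollectB, hl2], hl⟩
    · have hl' : PySem.Chars.startswith l.toList ['>'] = false := by simpa using hl
      rw [show pvCollectB (l :: t) parts
          = pvCollectB t (if PySem.Str.strip l ≠ "" then parts ++ [PySem.Str.strip l] else parts)
          from by simp [pvCollectB, hl']]
      exact ih _

-- core correspondence, from a state holding a header
theorem foldA_parse (id_list : List String) (n : Nat) (rest : List String)
    (hn : rest.length ≤ n) (d : PySem.Dict String String)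
    (h : String) (hh : PySem.Str.startswith h ">" = true) :
    pvFlush id_list (rest.foldl (pvStepA id_list) (d, some h, []))
      = pvParseB (PySem.Set.ofList id_list) (h :: rest) d := by
  induction n generalizing rest d h with
  | zero =>
    have : rest = [] := List.eq_nil_of_length_eq_zero (Nat.le_zero.mp hn)
    subst this
    simp [pvFlush, pvParseB, pvCollectB, pvTruthy, ne_empty_of_startswith hh]
  | succ n ih =>
    have hh' : h ≠ "" := ne_empty_of_startswith hh
    rw [show pvParseB (PySem.Set.ofList id_list) (h :: rest) d
        = pvParseB (PySem.Set.ofList id_list) (pvCollectB rest []).2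
            (if PySem.Set.contains (PySem.Set.ofList id_list) (pvKey h) then
              d.insert h (PySem.Str.join "" (pvCollectB rest []).1)
            else d) from by rw [pvParseB]]
    simp only [foldA_body id_list rest d h hh' []]
    rcases pvCollectB_rest_head rest [] with he | ⟨l, t, he, hl⟩
    · rw [he]
      simp [pvFlush, pvParseB, pvTruthy, hh']
    · rw [he]
      simp only [List.foldl_cons]
      have hstep : pvStepA id_list (d, some h, (pvCollectB rest []).1) l
          = ((if PySem.Set.contains (PySem.Set.ofList id_list) (pvKey h) then
                d.insert h (PySem.Str.join "" (pvCollectB rest []).1)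
              else d), some l, []) := by
        have hl2 : PySem.Chars.startswith l.toList ['>'] = true := by simpa using hl
        simp [pvStepA, hl2, pvTruthy, hh']
      rw [hstep]
      have ht : t.length ≤ n := by
        have h1 := pvCollectB_rest_le rest ([] : List String)
        rw [he] at h1
        simp at h1
        omega
      exact ih t ht _ l hl

-- the whole loop of A, from the initial header-less state
theorem foldA_top (id_list : List String) (lines : List String) (d : PySem.Dict String String) :
    pvFlush id_list (lines.foldl (pvStepA id_list) (d, none, []))
      = pvParseB (PySem.Set.ofList id_list)
          (lines.dropWhile (fun l => !PySem.Str.startswith l ">")) d := by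
  induction lines with
  | nil => simp [pvFlush, pvParseB, pvTruthy]
  | cons l ls ih =>
    by_cases hl : PySem.Str.startswith l ">" = true
    · have hl2 : PySem.Chars.startswith l.toList ['>'] = true := by simpa using hl
      have hstep : pvStepA id_list (d, none, []) l = (d, some l, []) := by
        simp [pvStepA, hl2, pvTruthy]
      rw [List.foldl_cons, hstep, List.dropWhile_cons, if_neg (by simp [hl2])]
      exact foldA_parse id_list ls.length ls le_rfl d l hl
    · have hl' : PySem.Chars.startswith l.toList ['>'] = false := by simpa using hl
      have hstep : pvStepA id_list (d, none, []) l = (d, none, []) := by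
        simp [pvStepA, hl', pvTruthy]
      rw [List.foldl_cons, hstep, List.dropWhile_cons, if_pos (by simp [hl'])]
      exact ih

-- ---- B-side: the block fold equals the same record recursion ----
theorem map_ofList_takeWhile (t : List (List Char)) :
    (t.map String.ofList).takeWhile (fun s => !PySem.Str.startswith s ">")
      = (t.takeWhile pvNotHdr).map String.ofList := by
  rw [List.takeWhile_map]
  have : ((fun s => !PySem.Str.startswith s ">") ∘ String.ofList) = pvNotHdr :=
    funext (fun l => by simp [Function.comp, PySem.Chars.startswith, pvNotHdr])
  rw [this]

theorem map_ofList_dropWhile (t : List (List Char)) :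
    (t.map String.ofList).dropWhile (fun s => !PySem.Str.startswith s ">")
      = (t.dropWhile pvNotHdr).map String.ofList := by
  rw [List.dropWhile_map]
  have : ((fun s => !PySem.Str.startswith s ">") ∘ String.ofList) = pvNotHdr :=
    funext (fun l => by simp [Function.comp, PySem.Chars.startswith, pvNotHdr])
  rw [this]

theorem dropWhile_head_false {α : Type} (p : α → Bool) (xs : List α) :
    ∀ hd t, xs.dropWhile p = hd :: t → p hd = false := by
  induction xs with
  | nil => intro hd t h; simp [List.dropWhile] at h
  | cons x rest ih =>
    intro hd t h
    rw [List.dropWhile_cons] at h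
    by_cases hx : p x = true
    · rw [if_pos hx] at h; exact ih hd t h
    · rw [if_neg hx] at h
      injection h with h1 _
      subst h1
      simpa using hx

theorem pvCollectB_spec (lines : List String) : ∀ parts,
    pvCollectB lines parts
      = (parts ++ ((lines.takeWhile (fun l => !PySem.Str.startswith l ">")).map
            PySem.Str.strip).filter (fun s => s ≠ ""),
         lines.dropWhile (fun l => !PySem.Str.startswith l ">")) := by
  induction lines with
  | nil => intro parts; simp [pvCollectB]
  | cons l rest ih =>
    intro parts
    rw [pvCollectB, List.takeWhile_cons, List.dropWhile_cons]
    by_cases hl : PySem.Str.startswith l ">" = true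
    · have hl2 : PySem.Chars.startswith l.toList ['>'] = true := by simpa using hl
      simp [hl2]
    · have hl2 : PySem.Chars.startswith l.toList ['>'] = false := by simpa using hl
      have hl' : (!PySem.Str.startswith l ">") = true := by simpa using hl2
      rw [if_neg hl, hl']
      simp only [if_true]
      rw [ih]
      by_cases hs : PySem.Str.strip l = ""
      · simp [hs]
      · simp [hs]

theorem header_eq_of_prefix {h : List Char} (hp : ['>'].isPrefixOf h = true) :
    '>' :: h.tail = h := by
  cases h with
  | nil => simp [List.isPrefixOf] at hp
  | cons a t =>
    have : '>' = a := by simpa [List.isPrefixOf] using hp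
    simp [← this]

theorem fold_blocksAfter (ids : PySem.Set String) (n : Nat) :
    ∀ (gls : List (List Char)) (d : PySem.Dict String String), gls.length ≤ n →
    (∀ l ∈ gls, '\n' ∉ l) →
    (∀ hd t, gls = hd :: t → ['>'].isPrefixOf hd) →
    ((pvBlocksAfter gls).map String.ofList).foldl (pvAltStep ids) d
      = pvParseB ids (gls.map String.ofList) d := by
  induction n with
  | zero =>
    intro gls d hl _ _
    have : gls = [] := List.eq_nil_of_length_eq_zero (Nat.le_zero.mp hl)
    subst this
    simp [pvBlocksAfter, pvParseB]
  | succ n ih =>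
    intro gls d hl hnl hhd
    cases gls with
    | nil => simp [pvBlocksAfter, pvParseB]
    | cons h t =>
      have hph : ['>'].isPrefixOf h = true := hhd h t rfl
      rw [pvBlocksAfter, List.map_cons, List.foldl_cons]
      -- evaluate the first pvAltStep
      have hbody : ∀ l ∈ t.takeWhile pvNotHdr, '\n' ∉ l :=
        fun l hm => hnl l (by
          exact List.mem_cons_of_mem h ((t.takeWhile_sublist pvNotHdr).subset hm))
      have hsplit : pvSplit '\n' [] (h.tail ++ pvPrefJoin (t.takeWhile pvNotHdr))
          = h.tail :: t.takeWhile pvNotHdr :=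
        pvSplit1_prefJoin _ h.tail
          (fun hm => hnl h (by simp) (List.mem_of_mem_tail hm)) hbody
      have hstep : pvAltStep ids d
            (String.ofList (h.tail ++ pvPrefJoin (t.takeWhile pvNotHdr)))
          = if PySem.Set.contains ids (pvKey (String.ofList h)) then
              d.insert (String.ofList h)
                (PySem.Str.join ""
                  ((((t.takeWhile pvNotHdr).map String.ofList).map PySem.Str.strip).filter
                    (fun s => s ≠ "")))
            else d := by
        rw [pvAltStep]
        simp only [PySem.Str.split?, String.toList_ofList,
          show ("\n" : String).toList = ['\n'] from rfl]
        rw [show PySem.Chars.split? (h.tail ++ pvPrefJoin (t.takeWhile pvNotHdr)) ['\n']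
            = some (pvSplit '\n' [] (h.tail ++ pvPrefJoin (t.takeWhile pvNotHdr))) from by
          simp [PySem.Chars.split?, splitOn_eq_pvSplit]]
        rw [hsplit]
        simp only [Option.map_some, Option.getD_some, List.map_cons,
          PySem.List.pyGetD_zero_cons, String.toList_ofList, PySem.List.slice_from_one,
          List.tail_cons, header_eq_of_prefix hph]
      rw [hstep]
      simp only [List.map_cons]
      rw [pvParseB]
      rw [show pvCollectB (t.map String.ofList) []
          = ([] ++ (((t.map String.ofList).takeWhile (fun l => !PySem.Str.startswith l ">")).map
                PySem.Str.strip).filter (fun s => s ≠ ""),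
             (t.map String.ofList).dropWhile (fun l => !PySem.Str.startswith l ">")) from
        pvCollectB_spec (t.map String.ofList) []]
      simp only [List.nil_append, map_ofList_takeWhile, map_ofList_dropWhile]
      rw [ih (t.dropWhile pvNotHdr) _
        (by
          have h1 := List.length_dropWhile_le pvNotHdr t
          simp at hl
          omega)
        (fun l hm => hnl l (List.mem_cons_of_mem h ((t.dropWhile_sublist pvNotHdr).subset hm)))
        (fun hd t2 he => by
          have := dropWhile_head_false pvNotHdr t hd t2 he
          simpa [pvNotHdr] using this)]

-- ===== VERDICT (by name: the statement is the Claim_ definition above) =====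
theorem extract_sequences_by_ids_spec : Claim_equal_extract_sequences_by_ids := by
  intro file_content id_list _
  unfold Spec_extract_sequences_by_ids extract_sequences_by_ids extract_sequences_by_ids_alt
  show (pvFlush id_list (((PySem.Str.split? file_content "\n").getD []).foldl (pvStepA id_list)
      (PySem.Dict.empty, none, []))).items = _
  have hsplitA : (PySem.Str.split? file_content "\n").getD []
      = (pvSplit '\n' [] file_content.toList).map String.ofList := by
    simp [PySem.Str.split?, show ("\n" : String).toList = ['\n'] from rfl,
      PySem.Chars.split?, splitOn_eq_pvSplit]
  have hsplitB : (PySem.Str.split? (String.ofList ('\n' :: file_content.toList)) "\n>").getD []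
      = (pvSplit '\n' ['>'] ('\n' :: file_content.toList)).map String.ofList := by
    simp [PySem.Str.split?, show ("\n>" : String).toList = ['\n', '>'] from rfl,
      PySem.Chars.split?, splitOn_eq_pvSplit]
  rw [hsplitA, hsplitB, foldA_top, map_ofList_dropWhile]
  rw [pvSplit2_eq_glue ('\n' :: file_content.toList).length _ le_rfl]
  rw [show pvSplit '\n' [] ('\n' :: file_content.toList)
      = [] :: pvSplit '\n' [] file_content.toList from by
    rw [pvSplit1_cons]; simp]
  rw [pvGlue_records (pvSplit '\n' [] file_content.toList) []]
  simp only [List.map_cons, PySem.List.slice_from_one, List.tail_cons]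
  rw [fold_blocksAfter (PySem.Set.ofList id_list)
    ((pvSplit '\n' [] file_content.toList).dropWhile pvNotHdr).length _ _ le_rfl
    (fun l hm => pvSplit1_no_newline file_content.toList l
      ((List.dropWhile_sublist pvNotHdr).subset hm))
    (fun hd t2 he => by
      have := dropWhile_head_false pvNotHdr (pvSplit '\n' [] file_content.toList) hd t2 he
      simpa [pvNotHdr] using this)]
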